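-- pv_equiv track=rewrite | github.com/gitanirban/CodePractice | Hrank_LeetCode/HackSussex/Max Score from Removing Stones.py | Max_Score_from_Removing_Stones
-- ===== SOURCE A (Python) =====
-- def Max_Score_from_Removing_Stones(a: int, b: int, c: int) -> int:
--     l = sorted([a, b, c])
--     l = [x for x in l if x]
--     res = 0
--     while len(l) > 1:
--         l[-2] -= 1
--         l[-1] -= 1
--         res += 1
--         l = sorted(x for x in l if x)
--
--     return res
-- ===== SOURCE B (Python) =====
-- def Max_Score_from_Removing_Stones(a, b, c):
--     total = a + b + c
--     return min(total // 2, total - max(a, b, c))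
-- ===== Notes on version B (the rewrite author's own statement) =====
-- stated objective: faster
-- what changed: Replaced A's step-by-step simulation loop (decrement the two largest piles, re-sort, repeat) by the O(1) closed form min(total//2, total-max); Pre_ restricts to nonnegative pile counts, the natural domain: with a negative argument A's loop pairs against a pile that never empties, returning an accidental value (one negative) or never terminating (two negatives).
-- outside the precondition, e.g. on Max_Score_from_Removing_Stones(-5, 3, 4): A returns 4, B returns -2; on Max_Score_from_Removing_Stones(-1, -1, 5): A does not finish within the time limit, B returns -2
import Mathlib
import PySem

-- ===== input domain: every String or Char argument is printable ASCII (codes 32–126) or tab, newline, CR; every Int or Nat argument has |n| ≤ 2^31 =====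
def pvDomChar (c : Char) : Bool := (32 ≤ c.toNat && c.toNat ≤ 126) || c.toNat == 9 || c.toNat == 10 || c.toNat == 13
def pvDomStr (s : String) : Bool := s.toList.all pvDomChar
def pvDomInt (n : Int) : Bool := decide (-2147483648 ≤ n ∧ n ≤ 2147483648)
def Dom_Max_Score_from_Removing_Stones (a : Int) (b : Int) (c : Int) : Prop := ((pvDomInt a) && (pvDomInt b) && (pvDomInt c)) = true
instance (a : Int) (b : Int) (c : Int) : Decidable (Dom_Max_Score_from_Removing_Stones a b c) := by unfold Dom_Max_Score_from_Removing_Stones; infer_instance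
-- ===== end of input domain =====

-- B replaces A's simulation loop by the O(1) closed form min(total // 2, total - max)
-- (measured faster: O(1) vs one loop iteration per removed pair).

-- ===== PORT A =====
-- the while-loop of A; the fuel argument only makes the recursion total — it is chosen
-- large enough that it never runs out on inputs satisfying Pre_ (see pvStoneLoop_spec).
def pvStoneLoop : Nat → List Int → Int → Int
  | 0, _, res => res
  | fuel+1, l, res =>
    if 1 < l.length then
      let l1 := PySem.List.pySetD l (-2) (PySem.List.pyGetD l (-2) 0 - 1)
      let l2 := PySem.List.pySetD l1 (-1) (PySem.List.pyGetD l1 (-1) 0 - 1)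
      pvStoneLoop fuel (PySem.List.sorted (l2.filter (fun x => x ≠ 0)) (fun x => x) false) (res + 1)
    else res

def Max_Score_from_Removing_Stones (a : Int) (b : Int) (c : Int) : Int :=
  pvStoneLoop (a.toNat + b.toNat + c.toNat + 1)
    ((PySem.List.sorted [a, b, c] (fun x => x) false).filter (fun x => x ≠ 0)) 0

-- ===== PORT B =====
def Max_Score_from_Removing_Stones_alt (a : Int) (b : Int) (c : Int) : Int :=
  let total := a + b + c
  min (PySem.Int.floordiv total 2) (total - max a (max b c))

-- ===== PRECONDITION & SPEC =====
-- Pre_ restricts to nonnegative pile counts, the natural domain of the problem: with a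
-- negative argument A's loop keeps pairing against a pile that never empties, so it
-- returns an accidental value (one negative) or never terminates (two or more negatives).
def Pre_Max_Score_from_Removing_Stones (a : Int) (b : Int) (c : Int) : Prop :=
  0 ≤ a ∧ 0 ≤ b ∧ 0 ≤ c
instance (a : Int) (b : Int) (c : Int) : Decidable (Pre_Max_Score_from_Removing_Stones a b c) := by unfold Pre_Max_Score_from_Removing_Stones; infer_instance

def pvWitness_Max_Score_from_Removing_Stones : Int × Int × Int := (2, 4, 6)

def Spec_Max_Score_from_Removing_Stones (a : Int) (b : Int) (c : Int) (out : Int) : Prop := out = Max_Score_from_Removing_Stones_alt a b c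
instance (a : Int) (b : Int) (c : Int) (out : Int) : Decidable (Spec_Max_Score_from_Removing_Stones a b c out) := by unfold Spec_Max_Score_from_Removing_Stones; infer_instance

-- ===== CLAIM (what is proved, stated in full; the proofs are below) =====
def Claim_equal_Max_Score_from_Removing_Stones : Prop := ∀ (a : Int) (b : Int) (c : Int), Dom_Max_Score_from_Removing_Stones a b c → Pre_Max_Score_from_Removing_Stones a b c → Spec_Max_Score_from_Removing_Stones a b c (Max_Score_from_Removing_Stones a b c)

-- ===== LEMMAS AND PROOFS =====

-- the value of A's loop on a state satisfying pvInv: the number of further iterations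
-- until fewer than two elements remain.
def pvScore : List Int → Int
  | [x, y] => if x < 0 then y else min ((x + y) / 2) x
  | [x, y, z] => if x < 0 then max ((y + z) - (y + z) / 2) z else min ((x + y + z) / 2) (x + y)
  | _ => 0

-- invariant of A's loop state: sorted, all elements nonzero, at most one (hence only the
-- first) negative, at most three elements.
def pvInv (l : List Int) : Prop :=
  l = [] ∨ (∃ x, l = [x] ∧ x ≠ 0) ∨
  (∃ x y, l = [x, y] ∧ x ≤ y ∧ x ≠ 0 ∧ 0 < y) ∨
  (∃ x y z, l = [x, y, z] ∧ x ≤ y ∧ y ≤ z ∧ x ≠ 0 ∧ 0 < y ∧ 0 < z)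

lemma pvSorted1 (x : Int) : PySem.List.sorted [x] (fun t => t) false = [x] :=
  PySem.List.sorted_eq_self_of_pairwise [x] (fun t => t) (by simp)

lemma pvSorted2 (x y : Int) (h : x ≤ y) :
    PySem.List.sorted [x, y] (fun t => t) false = [x, y] :=
  PySem.List.sorted_eq_self_of_pairwise [x, y] (fun t => t) (by simp; omega)

lemma pvSorted3 (x y z : Int) (h1 : x ≤ y) (h2 : y ≤ z) :
    PySem.List.sorted [x, y, z] (fun t => t) false = [x, y, z] :=
  PySem.List.sorted_eq_self_of_pairwise [x, y, z] (fun t => t) (by simp; constructor <;> omega)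

lemma pvStoneLoop_spec : ∀ (fuel : Nat) (l : List Int) (res : Int),
    pvInv l → pvScore l ≤ (fuel : Int) → pvStoneLoop fuel l res = res + pvScore l := by
  intro fuel
  induction fuel with
  | zero =>
    intro l res hInv hle
    rcases hInv with h | ⟨x, h, hx⟩ | ⟨x, y, h, hxy, hx, hy⟩ | ⟨x, y, z, h, hxy, hyz, hx, hy, hz⟩ <;> subst h
    · simp [pvStoneLoop, pvScore]
    · simp [pvStoneLoop, pvScore]
    · exfalso; simp only [pvScore, Nat.cast_zero] at hle; split_ifs at hle <;> omega
    · exfalso; simp only [pvScore, Nat.cast_zero] at hle; split_ifs at hle <;> omega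
  | succ fuel ih =>
    intro l res hInv hle
    rcases hInv with h | ⟨x, h, hx⟩ | ⟨x, y, h, hxy, hx, hy⟩ | ⟨x, y, z, h, hxy, hyz, hx, hy, hz⟩ <;> subst h
    · simp [pvStoneLoop, pvScore]
    · simp [pvStoneLoop, pvScore]
    · -- two piles: one step decrements both, drops zeros, re-sorts
      have hstep : pvStoneLoop (fuel + 1) [x, y] res =
          pvStoneLoop fuel (PySem.List.sorted ([x - 1, y - 1].filter (fun t => t ≠ 0)) (fun t => t) false) (res + 1) := rfl
      rw [hstep]
      by_cases hx1 : x = 1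
      · subst hx1
        by_cases hy1 : y = 1
        · subst hy1
          have hfil : [(1 : Int) - 1, 1 - 1].filter (fun t => t ≠ 0) = [] := by decide
          rw [hfil, show PySem.List.sorted ([] : List Int) (fun t => t) false = [] from rfl,
            ih [] (res + 1) (Or.inl rfl) (by simp [pvScore])]
          simp only [pvScore]; omega
        · have hy1' : y - 1 ≠ 0 := by omega
          have hfil : [(1 : Int) - 1, y - 1].filter (fun t => t ≠ 0) = [y - 1] := by
            simp [List.filter, hy1']
          rw [hfil, pvSorted1,
            ih [y - 1] (res + 1) (Or.inr (Or.inl ⟨y - 1, rfl, hy1'⟩)) (by simp [pvScore])]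
          simp only [pvScore]; split_ifs <;> omega
      · by_cases hy1 : y = 1
        · -- x ≤ y = 1, x ∉ {0,1} : x is the negative pile
          subst hy1
          have hx1' : x - 1 ≠ 0 := by omega
          have hfil : [x - 1, (1 : Int) - 1].filter (fun t => t ≠ 0) = [x - 1] := by
            simp [List.filter, hx1']
          rw [hfil, pvSorted1,
            ih [x - 1] (res + 1) (Or.inr (Or.inl ⟨x - 1, rfl, hx1'⟩)) (by simp [pvScore])]
          simp only [pvScore]; split_ifs <;> omega
        · have hx1' : x - 1 ≠ 0 := by omega
          have hy1' : y - 1 ≠ 0 := by omega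
          have hfil : [x - 1, y - 1].filter (fun t => t ≠ 0) = [x - 1, y - 1] := by
            simp [List.filter, hx1', hy1']
          have hrel : pvScore [x - 1, y - 1] + 1 = pvScore [x, y] := by
            simp only [pvScore]; split_ifs <;> omega
          rw [hfil, pvSorted2 _ _ (by omega),
            ih [x - 1, y - 1] (res + 1)
              (Or.inr (Or.inr (Or.inl ⟨x - 1, y - 1, rfl, by omega, hx1', by omega⟩)))
              (by omega)]
          omega
    · -- three piles: one step decrements the top two, drops zeros, re-sorts
      have hstep : pvStoneLoop (fuel + 1) [x, y, z] res =
          pvStoneLoop fuel (PySem.List.sorted ([x, y - 1, z - 1].filter (fun t => t ≠ 0)) (fun t => t) false) (res + 1) := rfl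
      rw [hstep]
      by_cases hy1 : y = 1
      · subst hy1
        by_cases hz1 : z = 1
        · subst hz1
          have hfil : [x, (1 : Int) - 1, 1 - 1].filter (fun t => t ≠ 0) = [x] := by
            simp [List.filter, hx]
          rw [hfil, pvSorted1,
            ih [x] (res + 1) (Or.inr (Or.inl ⟨x, rfl, hx⟩)) (by simp [pvScore])]
          simp only [pvScore]; split_ifs <;> omega
        · have hz1' : z - 1 ≠ 0 := by omega
          have hfil : [x, (1 : Int) - 1, z - 1].filter (fun t => t ≠ 0) = [x, z - 1] := by
            simp [List.filter, hx, hz1']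
          have hrel : pvScore [x, z - 1] + 1 = pvScore [x, 1, z] := by
            simp only [pvScore]; split_ifs <;> omega
          rw [hfil, pvSorted2 _ _ (by omega),
            ih [x, z - 1] (res + 1)
              (Or.inr (Or.inr (Or.inl ⟨x, z - 1, rfl, by omega, hx, by omega⟩)))
              (by omega)]
          omega
      · have hy1' : y - 1 ≠ 0 := by omega
        have hz1' : z - 1 ≠ 0 := by omega
        have hfil : [x, y - 1, z - 1].filter (fun t => t ≠ 0) = [x, y - 1, z - 1] := by
          simp [List.filter, hx, hy1', hz1']
        rw [hfil]
        by_cases hxy1 : x ≤ y - 1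
        · have hrel : pvScore [x, y - 1, z - 1] + 1 = pvScore [x, y, z] := by
            simp only [pvScore]; split_ifs <;> omega
          rw [pvSorted3 _ _ _ (by omega) (by omega),
            ih [x, y - 1, z - 1] (res + 1)
              (Or.inr (Or.inr (Or.inr ⟨x, y - 1, z - 1, rfl, by omega, by omega, hx, by omega, by omega⟩)))
              (by omega)]
          omega
        · -- x = y (> 1): the decremented middle pile moves in front of x
          have hxey : x = y := by omega
          by_cases hxz : x ≤ z - 1
          · have hsort : PySem.List.sorted [x, y - 1, z - 1] (fun t => t) false = [y - 1, x, z - 1] :=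
              PySem.List.sorted_id_eq_of_perm_of_pairwise _ _ (List.Perm.swap x (y - 1) [z - 1])
                (by simp; constructor <;> omega)
            have hrel : pvScore [y - 1, x, z - 1] + 1 = pvScore [x, y, z] := by
              simp only [pvScore]; split_ifs <;> omega
            rw [hsort,
              ih [y - 1, x, z - 1] (res + 1)
                (Or.inr (Or.inr (Or.inr ⟨y - 1, x, z - 1, rfl, by omega, by omega, by omega, by omega, by omega⟩)))
                (by omega)]
            omega
          · -- x = y = z (> 1)
            have hxez : x = z := by omega
            have hsort : PySem.List.sorted [x, y - 1, z - 1] (fun t => t) false = [y - 1, z - 1, x] :=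
              PySem.List.sorted_id_eq_of_perm_of_pairwise _ _
                (List.Perm.trans (List.Perm.cons (y - 1) (List.Perm.swap x (z - 1) []))
                  (List.Perm.swap x (y - 1) [z - 1]))
                (by simp; constructor <;> omega)
            have hrel : pvScore [y - 1, z - 1, x] + 1 = pvScore [x, y, z] := by
              simp only [pvScore]; split_ifs <;> omega
            rw [hsort,
              ih [y - 1, z - 1, x] (res + 1)
                (Or.inr (Or.inr (Or.inr ⟨y - 1, z - 1, x, rfl, by omega, by omega, by omega, by omega, by omega⟩)))
                (by omega)]
            omega

-- sorting a 3-element literal list: the ordered rearrangement, with the permutation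
lemma pvSortedTriple (a b c : Int) : ∃ x y z, x ≤ y ∧ y ≤ z ∧ [x, y, z].Perm [a, b, c] ∧
    PySem.List.sorted [a, b, c] (fun t => t) false = [x, y, z] := by
  rcases le_total a b with hab | hab
  · rcases le_total b c with hbc | hbc
    · exact ⟨a, b, c, hab, hbc, List.Perm.refl _,
        PySem.List.sorted_id_eq_of_perm_of_pairwise _ _ (List.Perm.refl _) (by simp; constructor <;> omega)⟩
    · rcases le_total a c with hac | hac
      · exact ⟨a, c, b, hac, hbc, List.Perm.cons a (List.Perm.swap b c []),
          PySem.List.sorted_id_eq_of_perm_of_pairwise _ _ (List.Perm.cons a (List.Perm.swap b c []))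
            (by simp; constructor <;> omega)⟩
      · refine ⟨c, a, b, hac, hab, ?_, PySem.List.sorted_id_eq_of_perm_of_pairwise _ _ ?_ (by simp; constructor <;> omega)⟩ <;>
          exact List.Perm.trans (List.Perm.swap a c [b]) (List.Perm.cons a (List.Perm.swap b c []))
  · rcases le_total a c with hac | hac
    · exact ⟨b, a, c, hab, hac, List.Perm.swap a b [c],
        PySem.List.sorted_id_eq_of_perm_of_pairwise _ _ (List.Perm.swap a b [c]) (by simp; constructor <;> omega)⟩
    · rcases le_total b c with hbc | hbc
      · refine ⟨b, c, a, hbc, hac, ?_, PySem.List.sorted_id_eq_of_perm_of_pairwise _ _ ?_ (by simp; constructor <;> omega)⟩ <;>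
          exact List.Perm.trans (List.Perm.cons b (List.Perm.swap a c [])) (List.Perm.swap a b [c])
      · refine ⟨c, b, a, hbc, hab, ?_, PySem.List.sorted_id_eq_of_perm_of_pairwise _ _ ?_ (by simp; constructor <;> omega)⟩ <;>
          exact List.Perm.trans (List.Perm.swap b c [a])
            (List.Perm.trans (List.Perm.cons b (List.Perm.swap a c [])) (List.Perm.swap a b [c]))

-- evaluation of A's loop on a sorted nonnegative triple: the closed form min(S/2, S - max)
lemma pvKey (x y z : Int) (hxy : x ≤ y) (hyz : y ≤ z) (hx0 : 0 ≤ x) (fuel : Nat)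
    (hf : x.toNat + y.toNat + z.toNat < fuel) :
    pvStoneLoop fuel ([x, y, z].filter (fun t => t ≠ 0)) 0 = min ((x + y + z) / 2) (x + y) := by
  have hy0 : 0 ≤ y := le_trans hx0 hxy
  have hz0 : 0 ≤ z := le_trans hy0 hyz
  have hfuel : (x.toNat : Int) + y.toNat + z.toNat < (fuel : Int) := by exact_mod_cast hf
  rcases eq_or_lt_of_le hx0 with hx | hx
  · rcases eq_or_lt_of_le hy0 with hy | hy
    · rcases eq_or_lt_of_le hz0 with hz | hz
      · rw [show [x, y, z].filter (fun t => t ≠ 0) = [] from by simp [List.filter, ← hx, ← hy, ← hz],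
          pvStoneLoop_spec fuel [] 0 (Or.inl rfl) (by simp [pvScore]),
          show pvScore [] = 0 from rfl]
        omega
      · have hzne : z ≠ 0 := by omega
        rw [show [x, y, z].filter (fun t => t ≠ 0) = [z] from by simp [List.filter, ← hx, ← hy, hzne],
          pvStoneLoop_spec fuel [z] 0 (Or.inr (Or.inl ⟨z, rfl, hzne⟩)) (by simp [pvScore])]
        simp only [pvScore]
        omega
    · have hyne : y ≠ 0 := by omega
      have hzne : z ≠ 0 := by omega
      rw [show [x, y, z].filter (fun t => t ≠ 0) = [y, z] from by simp [List.filter, ← hx, hyne, hzne],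
        pvStoneLoop_spec fuel [y, z] 0 (Or.inr (Or.inr (Or.inl ⟨y, z, rfl, hyz, hyne, by omega⟩)))
          (by simp only [pvScore]; split_ifs <;> omega)]
      simp only [pvScore]
      split_ifs <;> omega
  · have hxne : x ≠ 0 := by omega
    have hyne : y ≠ 0 := by omega
    have hzne : z ≠ 0 := by omega
    rw [show [x, y, z].filter (fun t => t ≠ 0) = [x, y, z] from by simp [List.filter, hxne, hyne, hzne],
      pvStoneLoop_spec fuel [x, y, z] 0
        (Or.inr (Or.inr (Or.inr ⟨x, y, z, rfl, hxy, hyz, hxne, by omega, by omega⟩)))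
        (by simp only [pvScore]; split_ifs <;> omega)]
    simp only [pvScore]
    split_ifs <;> omega

-- ===== VERDICT (by name: the statement is the Claim_ definition above) =====
theorem Max_Score_from_Removing_Stones_spec : Claim_equal_Max_Score_from_Removing_Stones := by
  intro a b c _ hPre
  obtain ⟨ha, hb, hc⟩ := hPre
  unfold Spec_Max_Score_from_Removing_Stones Max_Score_from_Removing_Stones
  obtain ⟨x, y, z, hxy, hyz, hperm, hsort⟩ := pvSortedTriple a b c
  have hx0 : 0 ≤ x := by
    have hx : x ∈ [a, b, c] := hperm.mem_iff.mp (by simp)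
    simp at hx; rcases hx with h | h | h <;> omega
  have hsum : x + y + z = a + b + c := by
    have h := hperm.sum_eq
    simp only [List.sum_cons, List.sum_nil] at h
    omega
  have hzmax : ∀ t ∈ [a, b, c], t ≤ z := by
    intro t ht
    have : t ∈ [x, y, z] := hperm.mem_iff.mpr ht
    simp at this; rcases this with h | h | h <;> omega
  have haz := hzmax a (by simp)
  have hbz := hzmax b (by simp)
  have hcz := hzmax c (by simp)
  have hzmem : z ∈ [a, b, c] := hperm.mem_iff.mp (by simp)
  have hsumN := List.Perm.sum_eq (hperm.map Int.toNat)
  simp only [List.map, List.sum_cons, List.sum_nil] at hsumN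
  rw [hsort, pvKey x y z hxy hyz hx0 _ (by omega)]
  show min ((x + y + z) / 2) (x + y) =
    min (PySem.Int.floordiv (a + b + c) 2) ((a + b + c) - max a (max b c))
  rw [PySem.Int.floordiv_eq_ediv_of_pos (by omega)]
  simp at hzmem
  rcases hzmem with h | h | h <;> simp only [max_def] <;> split_ifs <;> omega
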